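-- pv_equiv track=rewrite | github.com/andersontruong/CSM152A-Labs | Lab2/Python/gen.py | get_exp_significand
-- ===== SOURCE A (Python) =====
-- def get_exp_significand(mag):
--     zero_count = 0
--     for i in reversed(range(4, 11)):
--         bit = 1 & (mag >> i)
--         if not bit:
--             zero_count += 1
--         else:
--             break
--
--     four_bits = mag >> 7 - zero_count
--     significand = four_bits
--     exp = 7 - zero_count
--
--     # Check for rounding bit
--     if zero_count != 7:
--         rounding_bit = (mag >> 6 - zero_count) & 1
--         if rounding_bit:
--             # Largest mag => largest representation
--             if mag == pow(2, 11) - 1: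
--                 significand = 15
--                 exp = 7
--             # Overflow => shift, increase exp
--             elif four_bits == 15:
--                 significand = 8
--                 # Avoid exponent overflow
--                 if exp != 7:
--                     exp += 1
--             # Round up
--             else:
--                 significand = four_bits + 1
--
--     return exp, significand
-- ===== SOURCE B (Python) =====
-- def get_exp_significand(mag):
--     # Closed-form exponent + arithmetic round-half-up: add half an ulp and shift,
--     # so there is no rounding-bit branch or four_bits variable; an overflow from
--     # rounding shows up as r == 16 (r == 16 cannot happen without rounding,
--     # because bit exp+3 of mag is the top set field bit, so (mag >> exp) & 8 != 0).
--     exp = ((mag >> 4) % 128).bit_length()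
--     if exp == 0:
--         return 0, mag
--     r = (mag + (1 << (exp - 1))) >> exp
--     if r != 16:
--         return exp, r
--     if mag == 2047:
--         return 7, 15
--     return (7 if exp == 7 else exp + 1), 8
-- ===== Notes on version B (the rewrite author's own statement) =====
-- stated objective: alternative
-- what changed: The leading-zero loop becomes a closed-form bit_length of the isolated field, and the rounding-bit branch with its round-up case disappears: B rounds arithmetically by adding half an ulp before the shift, detecting the rounding overflow as r == 16.
import Mathlib
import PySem

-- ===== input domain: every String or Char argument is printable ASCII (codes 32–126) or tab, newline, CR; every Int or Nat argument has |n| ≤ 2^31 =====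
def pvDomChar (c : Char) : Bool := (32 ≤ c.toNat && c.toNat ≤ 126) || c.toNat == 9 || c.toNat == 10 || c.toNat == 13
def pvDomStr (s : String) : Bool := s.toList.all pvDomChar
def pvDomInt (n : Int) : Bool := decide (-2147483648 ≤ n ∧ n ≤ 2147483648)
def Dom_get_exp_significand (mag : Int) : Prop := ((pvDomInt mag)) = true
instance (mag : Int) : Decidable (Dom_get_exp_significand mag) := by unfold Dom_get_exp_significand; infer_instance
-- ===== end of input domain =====

-- B replaces A's leading-zero loop and rounding-bit branch by a closed-form exponent
-- (bit_length of the isolated field) and arithmetic round-half-up (add half an ulp, then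
-- shift), detecting the rounding overflow as r = 16 (objective: alternative).

-- ===== PORT A =====
-- the `for i in reversed(range(4, 11))` loop with `break`: recursion over the index list,
-- returning the number of leading zero bits seen before the first one bit (zero_count ≤ 7)
def pvZcLoop (mag : Int) : List Nat → Nat
  | [] => 0
  | i :: rest => if PySem.Int.band 1 (mag >>> i) = 0 then pvZcLoop mag rest + 1 else 0

def get_exp_significand (mag : Int) : Int × Int :=
  let zero_count : Nat := pvZcLoop mag [10, 9, 8, 7, 6, 5, 4]
  -- zero_count ≤ 7 always, so Nat subtraction 7 - zero_count is Python's exact 7 - zero_count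
  let four_bits := mag >>> (7 - zero_count)
  let significand := four_bits
  let exp : Int := 7 - (zero_count : Int)
  if zero_count ≠ 7 then
    -- guard: inside this branch zero_count ≤ 6, so Nat 6 - zero_count is exact (Python never
    -- evaluates this shift with a negative amount)
    let rounding_bit := PySem.Int.band (mag >>> (6 - zero_count)) 1
    if rounding_bit ≠ 0 then
      if mag = 2 ^ 11 - 1 then (7, 15)
      else if four_bits = 15 then (if exp ≠ 7 then exp + 1 else exp, 8)
      else (exp, four_bits + 1)
    else (exp, significand)
  else (exp, significand)

-- ===== PORT B =====
def get_exp_significand_alt (mag : Int) : Int × Int :=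
  let exp : Nat := PySem.Int.bitLength (PySem.Int.mod (mag >>> (4:Nat)) 128)
  if exp = 0 then (0, mag)
  else
    -- `1 << (exp - 1)` is 2 ^ (exp - 1), exact here since exp ≥ 1
    let r := (mag + 2 ^ (exp - 1)) >>> exp
    if r ≠ 16 then ((exp : Int), r)
    else if mag = 2047 then ((7 : Int), 15)
    else ((if (exp : Int) = 7 then (7 : Int) else (exp : Int) + 1), 8)

-- ===== PRECONDITION & SPEC =====
def Spec_get_exp_significand (mag : Int) (out : Int × Int) : Prop := out = get_exp_significand_alt mag
instance (mag : Int) (out : Int × Int) : Decidable (Spec_get_exp_significand mag out) := by unfold Spec_get_exp_significand; infer_instance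

-- ===== CLAIM (what is proved, stated in full; the proofs are below) =====
def Claim_equal_get_exp_significand : Prop := ∀ (mag : Int), Dom_get_exp_significand mag → Spec_get_exp_significand mag (get_exp_significand mag)

-- ===== LEMMAS AND PROOFS =====

-- bit_length of an integer in [2^k, 2^(k+1)) is k + 1
theorem pv_bl_eq_of (f : Int) (k : Nat) (h1 : 2 ^ k ≤ f) (h2 : f < 2 ^ (k + 1)) :
    PySem.Int.bitLength f = k + 1 := by
  have hpos : (0 : Int) < 2 ^ k := by positivity
  have hne : f ≠ 0 := by omega
  have hA := PySem.Int.lt_two_pow_bitLength f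
  have hB := PySem.Int.two_pow_bitLength_le f hne
  have habs : |f| = f := abs_of_nonneg (by omega)
  have h1' : (2:Nat) ^ k ≤ f.natAbs := by zify; rw [habs]; exact_mod_cast h1
  have h2' : f.natAbs < (2:Nat) ^ (k + 1) := by zify; rw [habs]; exact_mod_cast h2
  set b := PySem.Int.bitLength f with hb
  by_contra hne2
  rcases Nat.lt_or_ge b (k + 1) with h | h
  · have : (2 : Nat) ^ b ≤ 2 ^ k := Nat.pow_le_pow_right (by norm_num) (by omega)
    omega
  · have : (2 : Nat) ^ (k + 1) ≤ 2 ^ (b - 1) := Nat.pow_le_pow_right (by norm_num) (by omega)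
    omega

theorem pv_bl_zero_iff (f : Int) (hf : 0 ≤ f) : PySem.Int.bitLength f = 0 ↔ f = 0 := by
  constructor
  · intro h
    have hA := PySem.Int.lt_two_pow_bitLength f
    rw [h] at hA
    omega
  · rintro rfl; exact PySem.Int.bitLength_zero

-- the loop counts 7 - bit_length((mag >> 4) % 128) leading zeros
theorem pv_zc_eq (mag : Int) :
    pvZcLoop mag [10, 9, 8, 7, 6, 5, 4] + PySem.Int.bitLength (PySem.Int.mod (mag >>> (4:Nat)) 128) = 7 := by
  set f : Int := PySem.Int.mod (mag >>> (4:Nat)) 128 with hf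
  have hf0 : 0 ≤ f := PySem.Int.mod_nonneg _ (by norm_num)
  have hf1 : f < 128 := PySem.Int.mod_lt _ (by norm_num)
  have hfe : f = mag / 16 % 128 := by
    rw [hf, PySem.Int.mod_eq_emod_of_pos (by norm_num), Int.shiftRight_eq_div_pow]; norm_num
  -- express each loop bit via f
  have hbit : ∀ i : Nat, 4 ≤ i → i ≤ 10 →
      (PySem.Int.band 1 (mag >>> (i:Nat)) = 0 ↔ f / 2 ^ (i - 4) % 2 = 0) := by
    intro i h4 h10
    rw [PySem.Int.band_comm, PySem.Int.band_one,
      PySem.Int.mod_eq_emod_of_pos (by norm_num : (0:Int) < 2),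
      Int.shiftRight_eq_div_pow, hfe]
    interval_cases i <;> norm_num <;> omega
  have b10 := hbit 10 (by norm_num) (by norm_num)
  have b9 := hbit 9 (by norm_num) (by norm_num)
  have b8 := hbit 8 (by norm_num) (by norm_num)
  have b7 := hbit 7 (by norm_num) (by norm_num)
  have b6 := hbit 6 (by norm_num) (by norm_num)
  have b5 := hbit 5 (by norm_num) (by norm_num)
  have b4 := hbit 4 (by norm_num) (by norm_num)
  norm_num at b10 b9 b8 b7 b6 b5 b4
  simp only [pvZcLoop]
  by_cases h6 : 64 ≤ f
  · rw [if_neg (by rw [b10]; omega)]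
    rw [pv_bl_eq_of f 6 (by norm_num; omega) (by norm_num; omega)]
  · rw [if_pos (by rw [b10]; omega)]
    by_cases h5 : 32 ≤ f
    · rw [if_neg (by rw [b9]; omega)]
      rw [pv_bl_eq_of f 5 (by norm_num; omega) (by norm_num; omega)]
    · rw [if_pos (by rw [b9]; omega)]
      by_cases h4 : 16 ≤ f
      · rw [if_neg (by rw [b8]; omega)]
        rw [pv_bl_eq_of f 4 (by norm_num; omega) (by norm_num; omega)]
      · rw [if_pos (by rw [b8]; omega)]
        by_cases h3 : 8 ≤ f
        · rw [if_neg (by rw [b7]; omega)]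
          rw [pv_bl_eq_of f 3 (by norm_num; omega) (by norm_num; omega)]
        · rw [if_pos (by rw [b7]; omega)]
          by_cases h2 : 4 ≤ f
          · rw [if_neg (by rw [b6]; omega)]
            rw [pv_bl_eq_of f 2 (by norm_num; omega) (by norm_num; omega)]
          · rw [if_pos (by rw [b6]; omega)]
            by_cases h1 : 2 ≤ f
            · rw [if_neg (by rw [b5]; omega)]
              rw [pv_bl_eq_of f 1 (by norm_num; omega) (by norm_num; omega)]
            · rw [if_pos (by rw [b5]; omega)]
              by_cases h0 : 1 ≤ f
              · rw [if_neg (by rw [b4]; omega)]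
                rw [pv_bl_eq_of f 0 (by norm_num; omega) (by norm_num; omega)]
              · rw [if_pos (by rw [b4]; omega)]
                have : f = 0 := by omega
                rw [this, PySem.Int.bitLength_zero]

-- ===== VERDICT (by name: the statement is the Claim_ definition above) =====
theorem get_exp_significand_spec : Claim_equal_get_exp_significand := by
  intro mag _
  unfold Spec_get_exp_significand get_exp_significand get_exp_significand_alt
  dsimp only
  set f : Int := PySem.Int.mod (mag >>> (4:Nat)) 128 with hf
  have hf0 : 0 ≤ f := PySem.Int.mod_nonneg _ (by norm_num)
  have hf1 : f < 128 := PySem.Int.mod_lt _ (by norm_num)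
  have hfe : f = mag / 16 % 128 := by
    rw [hf, PySem.Int.mod_eq_emod_of_pos (by norm_num), Int.shiftRight_eq_div_pow]; norm_num
  set bl : Nat := PySem.Int.bitLength f with hbl
  have hzc : pvZcLoop mag [10, 9, 8, 7, 6, 5, 4] + bl = 7 := pv_zc_eq mag
  set zc : Nat := pvZcLoop mag [10, 9, 8, 7, 6, 5, 4] with hzcdef
  by_cases hfz : f = 0
  · -- bl = 0: A skips the rounding branch, B takes the exp = 0 branch
    have hbl0 : bl = 0 := by rw [hbl, hfz]; exact PySem.Int.bitLength_zero
    have hz7 : zc = 7 := by omega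
    rw [if_pos hbl0, if_neg (by omega : ¬ zc ≠ 7)]
    simp [hz7]
  · have hbl1 : 1 ≤ bl := by
      rcases Nat.eq_zero_or_pos bl with h | h
      · exact absurd ((pv_bl_zero_iff f hf0).mp (hbl ▸ h)) hfz
      · exact h
    have hB := PySem.Int.two_pow_bitLength_le f hfz
    have hA := PySem.Int.lt_two_pow_bitLength f
    have habs : f.natAbs = f := by omega
    have hlo : (2:Int) ^ (bl - 1) ≤ f := by
      calc (2:Int) ^ (bl - 1) = ((2^(bl-1) : Nat) : Int) := by push_cast; ring
        _ ≤ (f.natAbs : Int) := by exact_mod_cast hB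
        _ = f := habs
    have hhi : f < (2:Int) ^ bl := by
      calc f = (f.natAbs : Int) := habs.symm
        _ < ((2^bl : Nat) : Int) := by exact_mod_cast hA
        _ = (2:Int) ^ bl := by push_cast; ring
    have hbl7 : bl ≤ 7 := by
      by_contra h
      have : (2:Int) ^ 7 ≤ 2 ^ (bl - 1) := by
        apply pow_le_pow_right₀ (by norm_num); omega
      norm_num at this; omega
    rw [if_neg (by omega : ¬ bl = 0), if_pos (by omega : zc ≠ 7)]
    have h7 : 7 - zc = bl := by omega
    have h6 : 6 - zc = bl - 1 := by omega
    have hexp : (7 : Int) - (zc : Int) = (bl : Int) := by omega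
    rw [h7, h6, hexp, PySem.Int.band_one, PySem.Int.mod_eq_emod_of_pos (by norm_num : (0:Int) < 2)]
    clear hzc hzcdef hbl hB hA habs hf hfz hf0
    clear_value bl
    rw [hfe] at hlo hhi
    clear hfe
    clear_value f
    interval_cases bl <;>
      (simp only [Int.shiftRight_eq_div_pow]; norm_num;
       split_ifs <;> simp_all [Prod.ext_iff] <;> omega)
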